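-- pv_equiv track=rewrite | github.com/jaideepr97/SearchEngine-COMPSCI-546 | COMPSCI546-3/extract_features.py | extract_anchor_text
-- ===== SOURCE A (Python) =====
-- def extract_anchor_text(content):
--     anchor_texts = []
--     inside_anchors = False
--     anchor_text = ""
--     for i in range (len(content)):
--         if content[i] == '>' and  not inside_anchors and content[i-1] != 'a':
--             inside_anchors = True
--             anchor_text = ""
--             continue
--         if content[i] == '<' and inside_anchors:
--             inside_anchors = False
--             anchor_texts.append(anchor_text)
--             anchor_text = ""
--         if inside_anchors:
--             anchor_text += str(content[i])
--     return anchor_texts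
-- ===== SOURCE B (Python) =====
-- def extract_anchor_text(content):
--     anchor_texts = []
--     n = len(content)
--     i = 0
--     while i < n:
--         if content[i] == '>' and (i == 0 or content[i - 1] != 'a'):
--             j = i + 1
--             while j < n and content[j] != '<':
--                 j += 1
--             if j == n:
--                 break  # unterminated segment: nothing further can ever be appended
--             anchor_texts.append(''.join(str(content[k]) for k in range(i + 1, j)))
--             i = j
--         else:
--             i += 1
--     return anchor_texts
-- ===== Notes on version B (the rewrite author's own statement) =====
-- stated objective: alternative
-- what changed: Replaces the flag-driven single pass that grows the current segment character by character with an explicit-index outer scan that, at each anchor-opening '>', searches forward for the next '<' and slices the segment out in one step.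
-- intended difference: On strings that start with '>' and end with 'a' and contain a '<' after position 0, A's negative-index wraparound compares content[-1] (the last character, 'a') as the 'previous' character of position 0 and so refuses the leading anchor, e.g. returning [] on '>x<a'; B treats position 0 as having no previous character and returns the leading segment (['x']), which is the intended reading of the previous-character test. — e.g. on extract_anchor_text(">x<a"): A returns [], B returns ["x"]
import Mathlib
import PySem

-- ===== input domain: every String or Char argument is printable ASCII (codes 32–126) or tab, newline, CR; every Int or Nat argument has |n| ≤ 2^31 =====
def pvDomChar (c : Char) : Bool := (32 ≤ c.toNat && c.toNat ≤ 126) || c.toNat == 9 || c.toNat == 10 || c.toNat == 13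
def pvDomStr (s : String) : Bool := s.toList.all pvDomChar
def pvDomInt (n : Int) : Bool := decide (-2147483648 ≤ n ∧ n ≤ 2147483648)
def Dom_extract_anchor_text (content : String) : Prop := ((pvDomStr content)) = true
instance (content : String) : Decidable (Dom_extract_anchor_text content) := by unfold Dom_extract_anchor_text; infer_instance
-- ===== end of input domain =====

-- B replaces A's flag-driven single pass by an explicit-index outer scan with an inner forward
-- search for the closing '<' (objective: alternative decomposition); B intentionally treats
-- position 0 as having no previous character where A's content[-1] wraps (see D_ below).

-- ===== PORT A =====
-- one loop iteration of A: state = (anchor_texts, inside_anchors, anchor_text as List Char)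
def pvStepA (cs : List Char) (st : List String × Bool × List Char) (i : Int) :
    List String × Bool × List Char :=
  let c := PySem.List.pyGetD cs i ' '        -- content[i], always in range here
  let p := PySem.List.pyGetD cs (i - 1) ' '  -- content[i-1], Python negative index at i = 0
  if c = '>' ∧ st.2.1 = false ∧ p ≠ 'a' then (st.1, true, ([] : List Char))  -- enter, continue
  else
    let st1 := if c = '<' ∧ st.2.1 = true then
        (st.1 ++ [String.ofList st.2.2], false, ([] : List Char)) else st
    if st1.2.1 = true then (st1.1, true, st1.2.2 ++ [c]) else st1

def extract_anchor_text (content : String) : List String :=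
  ((PySem.List.pyRange 0 (content.toList.length : Int) 1).foldl
    (pvStepA content.toList) ([], false, [])).1

-- ===== PORT B =====
-- inner while loop of B: first index k ≥ j with cs[k] = '<'; fuel bounds the bounded loop
def pvFindLt (cs : List Char) (fuel j : Nat) : Option Nat :=
  match fuel with
  | 0 => none
  | fuel + 1 =>
    if h : j < cs.length then
      if cs[j] = '<' then some j else pvFindLt cs fuel (j + 1)
    else none

-- outer while loop of B; fuel bounds the bounded loop (call sites pass enough fuel)
def pvScanB (cs : List Char) (fuel i : Nat) : List String :=
  match fuel with
  | 0 => []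
  | fuel + 1 =>
    if h : i < cs.length then
      if cs[i] = '>' ∧ (i = 0 ∨ cs.getD (i - 1) ' ' ≠ 'a') then  -- cs.getD in range when i ≠ 0
        match pvFindLt cs cs.length (i + 1) with
        | some j => String.ofList ((cs.drop (i + 1)).take (j - (i + 1))) :: pvScanB cs fuel j
        | none => []   -- j reached the end: unterminated segment, stop
      else pvScanB cs fuel (i + 1)
    else []

def extract_anchor_text_alt (content : String) : List String :=
  pvScanB content.toList content.toList.length 0

-- ===== PRECONDITION & SPEC =====
-- On strings that start with '>' and end with 'a' and contain a '<' after position 0, A's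
-- negative-index wraparound compares content[-1] = 'a' as the "previous" character of position 0
-- and refuses the leading anchor (e.g. [] on ">x<a"); B treats position 0 as having no previous
-- character and returns the leading segment (["x"]), the intended reading of the test.
def D_extract_anchor_text (content : String) : Prop :=
  content.toList ≠ [] ∧ content.toList.getD 0 ' ' = '>' ∧
    content.toList.getLast? = some 'a' ∧ '<' ∈ content.toList.drop 1
instance (content : String) : Decidable (D_extract_anchor_text content) := by
  unfold D_extract_anchor_text; infer_instance

def Spec_extract_anchor_text (content : String) (out : List String) : Prop :=
  ¬ D_extract_anchor_text content → out = extract_anchor_text_alt content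
instance (content : String) (out : List String) : Decidable (Spec_extract_anchor_text content out) := by
  unfold Spec_extract_anchor_text; infer_instance

def pvDiffWitness_extract_anchor_text : String := ">x<a"
def pvDiffWitnessOut_extract_anchor_text : (List String) × (List String) := ([], ["x"])

-- ===== CLAIM (what is proved, stated in full; the proofs are below) =====
def Claim_unchanged_extract_anchor_text : Prop :=
  ∀ (content : String), Dom_extract_anchor_text content →
    Spec_extract_anchor_text content (extract_anchor_text content)
def Claim_changed_extract_anchor_text : Prop :=
  Dom_extract_anchor_text (pvDiffWitness_extract_anchor_text) ∧
  D_extract_anchor_text (pvDiffWitness_extract_anchor_text) ∧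
  extract_anchor_text (pvDiffWitness_extract_anchor_text) = pvDiffWitnessOut_extract_anchor_text.1 ∧
  extract_anchor_text_alt (pvDiffWitness_extract_anchor_text) = pvDiffWitnessOut_extract_anchor_text.2 ∧
  pvDiffWitnessOut_extract_anchor_text.1 ≠ pvDiffWitnessOut_extract_anchor_text.2
def Claim_exact_extract_anchor_text : Prop :=
  ∀ (content : String), Dom_extract_anchor_text content →
    D_extract_anchor_text content →
      extract_anchor_text content ≠ extract_anchor_text_alt content

-- ===== LEMMAS AND PROOFS =====

-- A's loop from index i onward
def pvRunA (cs : List Char) (i : Nat) (st : List String × Bool × List Char) :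
    List String × Bool × List Char :=
  (PySem.List.pyRange (i : Int) (cs.length : Int) 1).foldl (pvStepA cs) st

theorem pvRunA_end (cs : List Char) (i : Nat) (st : List String × Bool × List Char)
    (h : cs.length ≤ i) : pvRunA cs i st = st := by
  unfold pvRunA
  rw [PySem.List.pyRange_one_eq_nil (by exact_mod_cast h)]
  rfl

theorem pvRunA_step (cs : List Char) (i : Nat) (st : List String × Bool × List Char)
    (h : i < cs.length) : pvRunA cs i st = pvRunA cs (i + 1) (pvStepA cs st (i : Int)) := by
  unfold pvRunA
  rw [PySem.List.pyRange_one_cons (by exact_mod_cast h)]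
  simp [List.foldl]

theorem stepA_out_enter (cs : List Char) (i : Nat) (acc : List String) (cur : List Char)
    (h : i < cs.length) (h1 : 1 ≤ i) (hc : cs[i] = '>') (hp : cs.getD (i - 1) ' ' ≠ 'a') :
    pvStepA cs (acc, false, cur) (i : Int) = (acc, true, []) := by
  have hg : cs.getD i ' ' = cs[i] := List.getD_eq_getElem _ _ h
  simp only [pvStepA]
  rw [show ((i : Int) - 1) = ((i - 1 : Nat) : Int) by omega,
    PySem.List.pyGetD_natCast, PySem.List.pyGetD_natCast, hg]
  rw [if_pos ⟨hc, trivial, hp⟩]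

theorem stepA_out_skip (cs : List Char) (i : Nat) (acc : List String) (cur : List Char)
    (h : i < cs.length) (h1 : 1 ≤ i) (hcond : ¬(cs[i] = '>' ∧ cs.getD (i - 1) ' ' ≠ 'a')) :
    pvStepA cs (acc, false, cur) (i : Int) = (acc, false, cur) := by
  have hg : cs.getD i ' ' = cs[i] := List.getD_eq_getElem _ _ h
  simp only [pvStepA]
  rw [show ((i : Int) - 1) = ((i - 1 : Nat) : Int) by omega,
    PySem.List.pyGetD_natCast, PySem.List.pyGetD_natCast, hg]
  rw [if_neg (by rintro ⟨ha, -, hb⟩; exact hcond ⟨ha, hb⟩), if_neg (by simp), if_neg (by simp)]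

theorem stepA_in_collect (cs : List Char) (i : Nat) (acc : List String) (cur : List Char)
    (h : i < cs.length) (hc : cs[i] ≠ '<') :
    pvStepA cs (acc, true, cur) (i : Int) = (acc, true, cur ++ [cs[i]]) := by
  have hg : cs.getD i ' ' = cs[i] := List.getD_eq_getElem _ _ h
  simp only [pvStepA]
  rw [PySem.List.pyGetD_natCast, hg]
  split_ifs with h1 h2 h3 <;> simp_all

theorem stepA_in_close (cs : List Char) (i : Nat) (acc : List String) (cur : List Char)
    (h : i < cs.length) (hc : cs[i] = '<') :
    pvStepA cs (acc, true, cur) (i : Int) = (acc ++ [String.ofList cur], false, []) := by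
  have hg : cs.getD i ' ' = cs[i] := List.getD_eq_getElem _ _ h
  simp only [pvStepA]
  rw [PySem.List.pyGetD_natCast, hg]
  split_ifs with h1 h2 h3 <;> simp_all

theorem stepA_zero_enter (cs : List Char) (acc : List String) (cur : List Char)
    (hne : cs ≠ []) (hc : cs.getD 0 ' ' = '>') (hp : cs.getLast hne ≠ 'a') :
    pvStepA cs (acc, false, cur) ((0 : Nat) : Int) = (acc, true, []) := by
  simp only [pvStepA]
  rw [show (((0 : Nat) : Int) - 1) = (-1 : Int) by norm_num, Nat.cast_zero,
    PySem.List.pyGetD_neg_one cs ' ' hne, PySem.List.pyGetD_zero]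
  rw [if_pos ⟨hc, trivial, hp⟩]

theorem stepA_zero_skip (cs : List Char) (acc : List String) (cur : List Char)
    (hne : cs ≠ []) (hcond : ¬(cs.getD 0 ' ' = '>' ∧ cs.getLast hne ≠ 'a')) :
    pvStepA cs (acc, false, cur) ((0 : Nat) : Int) = (acc, false, cur) := by
  simp only [pvStepA]
  rw [show (((0 : Nat) : Int) - 1) = (-1 : Int) by norm_num, Nat.cast_zero,
    PySem.List.pyGetD_neg_one cs ' ' hne, PySem.List.pyGetD_zero]
  rw [if_neg (by rintro ⟨ha, -, hb⟩; exact hcond ⟨ha, hb⟩), if_neg (by simp), if_neg (by simp)]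


theorem pvFindLt_none_of_ge (cs : List Char) (fuel j : Nat) (h : cs.length ≤ j) :
    pvFindLt cs fuel j = none := by
  cases fuel with
  | zero => rfl
  | succ f => simp [pvFindLt, Nat.not_lt.mpr h]

theorem pvFindLt_succ_unfold (cs : List Char) (f j : Nat) (hj : j < cs.length) :
    pvFindLt cs (f + 1) j =
      if cs[j] = '<' then some j else pvFindLt cs f (j + 1) := by
  rw [pvFindLt, dif_pos hj]

theorem pvFindLt_some (cs : List Char) :
    ∀ (fuel j k : Nat), pvFindLt cs fuel j = some k →
      j ≤ k ∧ ∃ hk : k < cs.length, cs[k] = '<' := by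
  intro fuel
  induction fuel with
  | zero => intro j k h; simp [pvFindLt] at h
  | succ f ih =>
    intro j k h
    by_cases hj : j < cs.length
    · rw [pvFindLt_succ_unfold cs f j hj] at h
      by_cases hc : cs[j] = '<'
      · rw [if_pos hc] at h
        cases h
        exact ⟨le_refl _, hj, hc⟩
      · rw [if_neg hc] at h
        obtain ⟨h1, h2⟩ := ih (j + 1) k h
        exact ⟨by omega, h2⟩
    · rw [pvFindLt_none_of_ge cs _ _ (by omega)] at h; cases h

theorem pvFindLt_fuel_congr (cs : List Char) :
    ∀ (f1 : Nat), ∀ (j f2 : Nat), cs.length - j ≤ f1 → cs.length - j ≤ f2 →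
      pvFindLt cs f1 j = pvFindLt cs f2 j := by
  intro f1
  induction f1 with
  | zero =>
    intro j f2 h1 h2
    rw [pvFindLt_none_of_ge cs _ _ (by omega), pvFindLt_none_of_ge cs _ _ (by omega)]
  | succ f ih =>
    intro j f2 h1 h2
    by_cases hj : j < cs.length
    · obtain ⟨g, rfl⟩ : ∃ g, f2 = g + 1 := ⟨f2 - 1, by omega⟩
      rw [pvFindLt_succ_unfold cs f j hj, pvFindLt_succ_unfold cs g j hj]
      by_cases hc : cs[j] = '<'
      · rw [if_pos hc, if_pos hc]
      · rw [if_neg hc, if_neg hc]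
        exact ih (j + 1) g (by omega) (by omega)
    · rw [pvFindLt_none_of_ge cs _ _ (by omega), pvFindLt_none_of_ge cs _ _ (by omega)]

theorem pvFindLt_self (cs : List Char) (i : Nat) (hi : i < cs.length) (hc : cs[i] = '<') :
    pvFindLt cs cs.length i = some i := by
  conv_lhs => rw [show cs.length = (cs.length - 1) + 1 by omega]
  rw [pvFindLt_succ_unfold cs _ i hi, if_pos hc]

theorem pvFindLt_step (cs : List Char) (i : Nat) (hi : i < cs.length) (hc : cs[i] ≠ '<') :
    pvFindLt cs cs.length i = pvFindLt cs cs.length (i + 1) := by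
  conv_lhs => rw [show cs.length = (cs.length - 1) + 1 by omega]
  rw [pvFindLt_succ_unfold cs _ i hi, if_neg hc]
  exact pvFindLt_fuel_congr cs (cs.length - 1) (i + 1) cs.length (by omega) (by omega)

theorem pvFindLt_none_of_no_lt (cs : List Char)
    (H : ∀ m, 1 ≤ m → ∀ hm : m < cs.length, cs[m] ≠ '<') :
    ∀ (fuel j : Nat), 1 ≤ j → pvFindLt cs fuel j = none := by
  intro fuel
  induction fuel with
  | zero => intro j _; rfl
  | succ f ih =>
    intro j hj
    by_cases h : j < cs.length
    · rw [pvFindLt_succ_unfold cs f j h, if_neg (H j hj h)]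
      exact ih (j + 1) (by omega)
    · exact pvFindLt_none_of_ge cs _ _ (by omega)

theorem pvScanB_nil_of_ge (cs : List Char) (fuel i : Nat) (h : cs.length ≤ i) :
    pvScanB cs fuel i = [] := by
  cases fuel with
  | zero => rfl
  | succ f => simp [pvScanB, Nat.not_lt.mpr h]

theorem pvScanB_entry_some (cs : List Char) (f i j : Nat) (hi : i < cs.length)
    (hcond : cs[i] = '>' ∧ (i = 0 ∨ cs.getD (i - 1) ' ' ≠ 'a'))
    (hfind : pvFindLt cs cs.length (i + 1) = some j) :
    pvScanB cs (f + 1) i =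
      String.ofList ((cs.drop (i + 1)).take (j - (i + 1))) :: pvScanB cs f j := by
  rw [pvScanB, dif_pos hi, if_pos hcond, hfind]

theorem pvScanB_entry_none (cs : List Char) (f i : Nat) (hi : i < cs.length)
    (hcond : cs[i] = '>' ∧ (i = 0 ∨ cs.getD (i - 1) ' ' ≠ 'a'))
    (hfind : pvFindLt cs cs.length (i + 1) = none) :
    pvScanB cs (f + 1) i = [] := by
  rw [pvScanB, dif_pos hi, if_pos hcond, hfind]

theorem pvScanB_skip (cs : List Char) (f i : Nat) (hi : i < cs.length)
    (hcond : ¬(cs[i] = '>' ∧ (i = 0 ∨ cs.getD (i - 1) ' ' ≠ 'a'))) :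
    pvScanB cs (f + 1) i = pvScanB cs f (i + 1) := by
  rw [pvScanB, dif_pos hi, if_neg hcond]

theorem pvScanB_fuel_congr (cs : List Char) :
    ∀ (f1 : Nat), ∀ (i f2 : Nat), cs.length - i ≤ f1 → cs.length - i ≤ f2 →
      pvScanB cs f1 i = pvScanB cs f2 i := by
  intro f1
  induction f1 with
  | zero =>
    intro i f2 h1 h2
    rw [pvScanB_nil_of_ge cs _ _ (by omega), pvScanB_nil_of_ge cs _ _ (by omega)]
  | succ f ih =>
    intro i f2 h1 h2
    by_cases hi : i < cs.length
    · obtain ⟨g, rfl⟩ : ∃ g, f2 = g + 1 := ⟨f2 - 1, by omega⟩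
      by_cases hcond : cs[i] = '>' ∧ (i = 0 ∨ cs.getD (i - 1) ' ' ≠ 'a')
      · cases hfind : pvFindLt cs cs.length (i + 1) with
        | some j =>
          obtain ⟨hij, hk, _⟩ := pvFindLt_some cs _ _ _ hfind
          rw [pvScanB_entry_some cs f i j hi hcond hfind,
            pvScanB_entry_some cs g i j hi hcond hfind,
            ih j g (by omega) (by omega)]
        | none =>
          rw [pvScanB_entry_none cs f i hi hcond hfind,
            pvScanB_entry_none cs g i hi hcond hfind]
      · rw [pvScanB_skip cs f i hi hcond, pvScanB_skip cs g i hi hcond]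
        exact ih (i + 1) g (by omega) (by omega)
    · rw [pvScanB_nil_of_ge cs _ _ (by omega), pvScanB_nil_of_ge cs _ _ (by omega)]

theorem pvScanB_nil_of_no_lt (cs : List Char)
    (H : ∀ m, 1 ≤ m → ∀ hm : m < cs.length, cs[m] ≠ '<') :
    ∀ (fuel i : Nat), 1 ≤ i → pvScanB cs fuel i = [] := by
  intro fuel
  induction fuel with
  | zero => intro i _; rfl
  | succ f ih =>
    intro i hi
    by_cases h : i < cs.length
    · by_cases hcond : cs[i] = '>' ∧ (i = 0 ∨ cs.getD (i - 1) ' ' ≠ 'a')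
      · exact pvScanB_entry_none cs f i h hcond
          (pvFindLt_none_of_no_lt cs H cs.length (i + 1) (by omega))
      · rw [pvScanB_skip cs f i h hcond]
        exact ih (i + 1) (by omega)
    · exact pvScanB_nil_of_ge cs _ _ (by omega)

-- result of A's inside-anchor phase, driven by the first '<' at or after i
def pvInsideSpec (cs : List Char) (i : Nat) (acc : List String) (cur : List Char) :
    List String :=
  match pvFindLt cs cs.length i with
  | some j =>
      (pvRunA cs (j + 1)
        (acc ++ [String.ofList (cur ++ (cs.drop i).take (j - i))], false, [])).1
  | none => acc

theorem pvInsideSpec_some (cs : List Char) (i j : Nat) (acc : List String) (cur : List Char)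
    (h : pvFindLt cs cs.length i = some j) :
    pvInsideSpec cs i acc cur =
      (pvRunA cs (j + 1)
        (acc ++ [String.ofList (cur ++ (cs.drop i).take (j - i))], false, [])).1 := by
  unfold pvInsideSpec
  rw [h]

theorem pvInsideSpec_none (cs : List Char) (i : Nat) (acc : List String) (cur : List Char)
    (h : pvFindLt cs cs.length i = none) :
    pvInsideSpec cs i acc cur = acc := by
  unfold pvInsideSpec
  rw [h]

-- A's inside-anchor phase: it collects characters until the first '<' from i on
theorem pvRunA_inside (cs : List Char) :
    ∀ (d : Nat), ∀ (i : Nat) (acc : List String) (cur : List Char),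
      cs.length - i ≤ d →
      (pvRunA cs i (acc, true, cur)).1 = pvInsideSpec cs i acc cur := by
  intro d
  induction d with
  | zero =>
    intro i acc cur hd
    rw [pvInsideSpec_none cs i acc cur (pvFindLt_none_of_ge cs _ _ (by omega)),
      pvRunA_end cs _ _ (by omega)]
  | succ d ih =>
    intro i acc cur hd
    by_cases hi : i < cs.length
    · by_cases hc : cs[i] = '<'
      · rw [pvInsideSpec_some cs i i acc cur (pvFindLt_self cs i hi hc),
          pvRunA_step cs i _ hi, stepA_in_close cs i acc cur hi hc]
        simp
      · rw [pvRunA_step cs i _ hi, stepA_in_collect cs i acc cur hi hc,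
          ih (i + 1) acc (cur ++ [cs[i]]) (by omega)]
        cases hres : pvFindLt cs cs.length (i + 1) with
        | none =>
          rw [pvInsideSpec_none cs _ acc _ hres,
            pvInsideSpec_none cs i acc cur ((pvFindLt_step cs i hi hc).trans hres)]
        | some j =>
          obtain ⟨hij, hk, _⟩ := pvFindLt_some cs _ _ _ hres
          rw [pvInsideSpec_some cs _ _ acc _ hres,
            pvInsideSpec_some cs i j acc cur ((pvFindLt_step cs i hi hc).trans hres)]
          have harr : cur ++ [cs[i]] ++ (cs.drop (i + 1)).take (j - (i + 1)) =
              cur ++ (cs.drop i).take (j - i) := by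
            rw [List.drop_eq_getElem_cons hi, show j - i = (j - (i + 1)) + 1 by omega,
              List.take_succ_cons]
            simp
          rw [harr]
    · rw [pvInsideSpec_none cs i acc cur (pvFindLt_none_of_ge cs _ _ (by omega)),
        pvRunA_end cs _ _ (by omega)]

-- A's outside-anchor phase from any index ≥ 1 agrees with B's scan
theorem pvRunA_outside (cs : List Char) :
    ∀ (d : Nat), ∀ (i : Nat) (acc : List String) (fuel : Nat),
      1 ≤ i → cs.length - i ≤ d → cs.length - i ≤ fuel →
      (pvRunA cs i (acc, false, [])).1 = acc ++ pvScanB cs fuel i := by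
  intro d
  induction d with
  | zero =>
    intro i acc fuel h1 hd hf
    rw [pvRunA_end cs _ _ (by omega), pvScanB_nil_of_ge cs _ _ (by omega)]
    simp
  | succ d ih =>
    intro i acc fuel h1 hd hf
    by_cases hi : i < cs.length
    · obtain ⟨g, rfl⟩ : ∃ g, fuel = g + 1 := ⟨fuel - 1, by omega⟩
      by_cases hcond : cs[i] = '>' ∧ cs.getD (i - 1) ' ' ≠ 'a'
      · rw [pvRunA_step cs i _ hi, stepA_out_enter cs i acc [] hi h1 hcond.1 hcond.2,
          pvRunA_inside cs cs.length (i + 1) acc [] (by omega)]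
        cases hres : pvFindLt cs cs.length (i + 1) with
        | none =>
          rw [pvInsideSpec_none cs _ acc _ hres,
            pvScanB_entry_none cs g i hi ⟨hcond.1, Or.inr hcond.2⟩ hres]
          simp
        | some j =>
          obtain ⟨hij, hk, hcj⟩ := pvFindLt_some cs _ _ _ hres
          rw [pvInsideSpec_some cs _ j acc _ hres,
            pvScanB_entry_some cs g i j hi ⟨hcond.1, Or.inr hcond.2⟩ hres,
            ih (j + 1) (acc ++ [String.ofList ([] ++ (cs.drop (i + 1)).take (j - (i + 1)))])
              g (by omega) (by omega) (by omega)]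
          have hBj : pvScanB cs g j = pvScanB cs g (j + 1) := by
            obtain ⟨g2, rfl⟩ : ∃ g2, g = g2 + 1 := ⟨g - 1, by omega⟩
            rw [pvScanB_skip cs g2 j hk (by simp [hcj])]
            exact pvScanB_fuel_congr cs g2 (j + 1) (g2 + 1) (by omega) (by omega)
          rw [hBj]
          simp
      · have hcondB : ¬(cs[i] = '>' ∧ (i = 0 ∨ cs.getD (i - 1) ' ' ≠ 'a')) := by
          rintro ⟨hgt, h0 | hpa⟩
          · omega
          · exact hcond ⟨hgt, hpa⟩
        rw [pvScanB_skip cs g i hi hcondB, pvRunA_step cs i _ hi,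
          stepA_out_skip cs i acc [] hi h1 hcond]
        exact ih (i + 1) acc g (by omega) (by omega) (by omega)
    · rw [pvRunA_end cs _ _ (by omega), pvScanB_nil_of_ge cs _ _ (by omega)]
      simp

theorem pvEquivList (cs : List Char)
    (hD : ¬(cs ≠ [] ∧ cs.getD 0 ' ' = '>' ∧ cs.getLast? = some 'a' ∧ '<' ∈ cs.drop 1)) :
    (pvRunA cs 0 ([], false, [])).1 = pvScanB cs cs.length 0 := by
  by_cases hne : cs = []
  · subst hne; rfl
  · have hlen : 0 < cs.length := List.length_pos_iff.mpr hne
    obtain ⟨L, hL⟩ : ∃ L, cs.length = L + 1 := ⟨cs.length - 1, by omega⟩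
    by_cases hc0 : cs.getD 0 ' ' = '>'
    · have hc0' : cs[0] = '>' := by rwa [List.getD_eq_getElem cs ' ' hlen] at hc0
      by_cases hlast : cs.getLast hne = 'a'
      · -- A's wraparound blocks the entry at 0; ¬D_ gives there is no '<' after position 0
        have hnomem : ¬('<' ∈ cs.drop 1) := by
          intro hmem
          exact hD ⟨hne, hc0, by rw [List.getLast?_eq_some_getLast hne, hlast], hmem⟩
        have H : ∀ m, 1 ≤ m → ∀ hm : m < cs.length, cs[m] ≠ '<' := by
          intro m h1m hm hcm
          apply hnomem
          have hgd : (cs.drop 1)[m - 1]'(by rw [List.length_drop]; omega) = cs[m] := by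
            rw [List.getElem_drop]
            congr 1
            omega
          rw [← hgd] at hcm
          exact hcm ▸ List.getElem_mem _
        conv_rhs => rw [hL]
        rw [pvScanB_entry_none cs L 0 hlen ⟨hc0', Or.inl rfl⟩
            (pvFindLt_none_of_no_lt cs H cs.length 1 (by omega)),
          pvRunA_step cs 0 _ hlen,
          stepA_zero_skip cs [] [] hne (by rintro ⟨-, hpa⟩; exact hpa hlast),
          pvRunA_outside cs cs.length 1 [] cs.length (by omega) (by omega) (by omega),
          pvScanB_nil_of_no_lt cs H cs.length 1 (by omega)]
        rfl
      · -- both sides enter the anchor at position 0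
        rw [pvRunA_step cs 0 _ hlen, stepA_zero_enter cs [] [] hne hc0 hlast,
          pvRunA_inside cs cs.length 1 [] [] (by omega)]
        cases hres : pvFindLt cs cs.length (0 + 1) with
        | none =>
          conv_rhs => rw [hL]
          rw [pvInsideSpec_none cs 1 [] [] hres,
            pvScanB_entry_none cs L 0 hlen ⟨hc0', Or.inl rfl⟩ hres]
        | some j =>
          obtain ⟨hij, hk, hcj⟩ := pvFindLt_some cs _ _ _ hres
          conv_rhs => rw [hL]
          rw [pvInsideSpec_some cs 1 j [] [] hres,
            pvScanB_entry_some cs L 0 j hlen ⟨hc0', Or.inl rfl⟩ hres,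
            pvRunA_outside cs cs.length (j + 1)
              ([] ++ [String.ofList ([] ++ (cs.drop 1).take (j - 1))]) L (by omega) (by omega)
              (by omega)]
          have hBj : pvScanB cs L j = pvScanB cs L (j + 1) := by
            obtain ⟨L2, rfl⟩ : ∃ L2, L = L2 + 1 := ⟨L - 1, by omega⟩
            rw [pvScanB_skip cs L2 j hk (by simp [hcj])]
            exact pvScanB_fuel_congr cs L2 (j + 1) (L2 + 1) (by omega) (by omega)
          rw [hBj]
          simp
    · -- no entry at position 0 on either side
      have hc0' : cs[0] ≠ '>' := by rwa [List.getD_eq_getElem cs ' ' hlen] at hc0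
      conv_rhs => rw [hL]
      rw [pvScanB_skip cs L 0 hlen (by rintro ⟨hgt, -⟩; exact hc0' hgt),
        pvRunA_step cs 0 _ hlen,
        stepA_zero_skip cs [] [] hne (by rintro ⟨hgt, -⟩; exact hc0 hgt),
        pvRunA_outside cs cs.length 1 [] L (by omega) (by omega) (by omega)]
      rfl


theorem pvFindLt_first (cs : List Char) :
    ∀ (fuel k j : Nat), pvFindLt cs fuel k = some j →
      ∀ m, k ≤ m → m < j → ∀ hm : m < cs.length, cs[m] ≠ '<' := by
  intro fuel
  induction fuel with
  | zero => intro k j h; simp [pvFindLt] at h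
  | succ f ih =>
    intro k j h m hkm hmj hm
    by_cases hk : k < cs.length
    · rw [pvFindLt_succ_unfold cs f k hk] at h
      by_cases hc : cs[k] = '<'
      · rw [if_pos hc] at h
        cases h
        omega
      · rw [if_neg hc] at h
        by_cases hmk : m = k
        · subst hmk; exact hc
        · exact ih (k + 1) j h m (by omega) hmj hm
    · rw [pvFindLt_none_of_ge cs _ _ (by omega)] at h; cases h

theorem pvFindLt_none_no_lt (cs : List Char) :
    ∀ (fuel k : Nat), cs.length - k ≤ fuel → pvFindLt cs fuel k = none →
      ∀ m, k ≤ m → ∀ hm : m < cs.length, cs[m] ≠ '<' := by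
  intro fuel
  induction fuel with
  | zero => intro k hf h m hkm hm; omega
  | succ f ih =>
    intro k hf h m hkm hm
    have hk : k < cs.length := by omega
    rw [pvFindLt_succ_unfold cs f k hk] at h
    by_cases hc : cs[k] = '<'
    · rw [if_pos hc] at h; cases h
    · rw [if_neg hc] at h
      by_cases hmk : m = k
      · subst hmk; exact hc
      · exact ih (k + 1) (by omega) h m (by omega) hm

theorem pvFindLt_eq_first (cs : List Char) (j : Nat) (hj : j < cs.length) (hcj : cs[j] = '<') :
    ∀ (fuel k : Nat), k ≤ j → cs.length - k ≤ fuel →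
      (∀ m, k ≤ m → m < j → ∀ hm : m < cs.length, cs[m] ≠ '<') →
      pvFindLt cs fuel k = some j := by
  intro fuel
  induction fuel with
  | zero => intro k hkj hf Hno; omega
  | succ f ih =>
    intro k hkj hf Hno
    have hk : k < cs.length := by omega
    rw [pvFindLt_succ_unfold cs f k hk]
    by_cases hkj' : k = j
    · subst hkj'; rw [if_pos hcj]
    · rw [if_neg (Hno k (le_refl k) (by omega) hk)]
      exact ih (k + 1) (by omega) (by omega) (fun m h1 h2 hm => Hno m (by omega) h2 hm)

-- inside D_, A's scan over the prefix before the first '<' yields either no segment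
-- or a strictly shorter first segment than B's
theorem pvScanB_mid (cs : List Char) (j : Nat) (hj : j < cs.length) (hcj : cs[j] = '<')
    (Hno : ∀ m, 1 ≤ m → m < j → ∀ hm : m < cs.length, cs[m] ≠ '<') :
    ∀ (fuel i : Nat), 1 ≤ i → i ≤ j → cs.length - i ≤ fuel →
      (∃ p, i ≤ p ∧ p < j ∧
        pvScanB cs fuel i =
          String.ofList ((cs.drop (p + 1)).take (j - (p + 1))) ::
            pvScanB cs cs.length (j + 1))
      ∨ pvScanB cs fuel i = pvScanB cs cs.length (j + 1) := by
  intro fuel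
  induction fuel with
  | zero => intro i h1 hij hf; omega
  | succ f ih =>
    intro i h1 hij hf
    have hi : i < cs.length := by omega
    by_cases hieqj : i = j
    · subst hieqj
      rw [pvScanB_skip cs f i hi (by simp [hcj])]
      exact Or.inr (pvScanB_fuel_congr cs f (i + 1) cs.length (by omega) (by omega))
    · have hij' : i < j := by omega
      by_cases hcond : cs[i] = '>' ∧ (i = 0 ∨ cs.getD (i - 1) ' ' ≠ 'a')
      · have hfind : pvFindLt cs cs.length (i + 1) = some j :=
          pvFindLt_eq_first cs j hj hcj cs.length (i + 1) (by omega) (by omega)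
            (fun m hm1 hm2 hm => Hno m (by omega) hm2 hm)
        rw [pvScanB_entry_some cs f i j hi hcond hfind]
        refine Or.inl ⟨i, le_refl i, hij', ?_⟩
        have htail : pvScanB cs f j = pvScanB cs cs.length (j + 1) := by
          obtain ⟨f2, rfl⟩ : ∃ f2, f = f2 + 1 := ⟨f - 1, by omega⟩
          rw [pvScanB_skip cs f2 j hj (by simp [hcj])]
          exact pvScanB_fuel_congr cs f2 (j + 1) cs.length (by omega) (by omega)
        rw [htail]
      · rw [pvScanB_skip cs f i hi hcond]
        rcases ih (i + 1) (by omega) (by omega) (by omega) with ⟨p, hp1, hp2, hpe⟩ | he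
        · exact Or.inl ⟨p, by omega, hp2, hpe⟩
        · exact Or.inr he

theorem pvTightList (cs : List Char) (hne : cs ≠ []) (hc0 : cs.getD 0 ' ' = '>')
    (hlastq : cs.getLast? = some 'a') (hmem : '<' ∈ cs.drop 1) :
    (pvRunA cs 0 ([], false, [])).1 ≠ pvScanB cs cs.length 0 := by
  have hlen : 0 < cs.length := List.length_pos_iff.mpr hne
  obtain ⟨L, hL⟩ : ∃ L, cs.length = L + 1 := ⟨cs.length - 1, by omega⟩
  have hc0' : cs[0] = '>' := by rwa [List.getD_eq_getElem cs ' ' hlen] at hc0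
  have hlast : cs.getLast hne = 'a' := by
    rw [List.getLast?_eq_some_getLast hne] at hlastq
    exact Option.some.inj hlastq
  -- the first '<' at or after position 1
  cases hfind1 : pvFindLt cs cs.length 1 with
  | none =>
    exfalso
    obtain ⟨k, hk, hkeq⟩ := List.mem_iff_getElem.mp hmem
    have hk' : 1 + k < cs.length := by
      rw [List.length_drop] at hk; omega
    have : cs[1 + k] = '<' := by rw [← List.getElem_drop]; exact hkeq
    exact pvFindLt_none_no_lt cs cs.length 1 (by omega) hfind1 (1 + k) (by omega) hk' this
  | some j =>
    obtain ⟨h1j, hj, hcj⟩ := pvFindLt_some cs _ _ _ hfind1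
    have Hno : ∀ m, 1 ≤ m → m < j → ∀ hm : m < cs.length, cs[m] ≠ '<' :=
      fun m h1 h2 hm => pvFindLt_first cs cs.length 1 j hfind1 m h1 h2 hm
    -- A skips position 0 (wraparound) and scans from 1
    have hA : (pvRunA cs 0 ([], false, [])).1 = pvScanB cs cs.length 1 := by
      rw [pvRunA_step cs 0 _ hlen,
        stepA_zero_skip cs [] [] hne (by rintro ⟨-, hpa⟩; exact hpa hlast),
        pvRunA_outside cs cs.length 1 [] cs.length (by omega) (by omega) (by omega)]
      rfl
    -- B takes the leading anchor at position 0
    have hB : pvScanB cs cs.length 0 =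
        String.ofList ((cs.drop 1).take (j - 1)) :: pvScanB cs cs.length (j + 1) := by
      conv_lhs => rw [hL]
      rw [pvScanB_entry_some cs L 0 j hlen ⟨hc0', Or.inl rfl⟩ hfind1]
      have htail : pvScanB cs L j = pvScanB cs cs.length (j + 1) := by
        obtain ⟨L2, rfl⟩ : ∃ L2, L = L2 + 1 := ⟨L - 1, by omega⟩
        rw [pvScanB_skip cs L2 j hj (by simp [hcj])]
        exact pvScanB_fuel_congr cs L2 (j + 1) cs.length (by omega) (by omega)
      rw [htail]
    rw [hA, hB]
    rcases pvScanB_mid cs j hj hcj Hno cs.length 1 (le_refl 1) h1j (by omega) with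
      ⟨p, hp1, hpj, hAeq⟩ | hAeq
    · rw [hAeq]
      intro heq
      have hheads := (List.cons.injEq _ _ _ _ ▸ heq).1
      have := congrArg (fun s => s.toList.length) hheads
      simp only [String.toList_ofList, List.length_take, List.length_drop] at this
      omega
    · rw [hAeq]
      intro heq
      have := congrArg List.length heq
      simp at this

-- ===== VERDICT (by name: the statement is the Claim_ definition above) =====
theorem extract_anchor_text_spec : Claim_unchanged_extract_anchor_text := by
  intro content _ hD
  show extract_anchor_text content = extract_anchor_text_alt content
  unfold extract_anchor_text extract_anchor_text_alt
  exact pvEquivList content.toList (by unfold D_extract_anchor_text at hD; exact hD)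

theorem extract_anchor_text_changed : Claim_changed_extract_anchor_text := by
  unfold Claim_changed_extract_anchor_text; decide

theorem extract_anchor_text_tight : Claim_exact_extract_anchor_text := by
  intro content _ hD
  obtain ⟨hne, hc0, hlast, hmem⟩ := hD
  show extract_anchor_text content ≠ extract_anchor_text_alt content
  unfold extract_anchor_text extract_anchor_text_alt
  exact pvTightList content.toList hne hc0 hlast hmem
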